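-- pv_equiv track=rewrite | github.com/pedrofuentes79/ejercicios_algoritmos_1 | CMS2/filasParecidas_TEST.py | filasParecidas
-- ===== SOURCE A (Python) =====
-- from typing import List
--
-- def todosIguales(l: List[int]) -> bool:
--   if len(l) == 0:
--     return False
--
--   primero = l[0]
--   for item in l[1:]:
--       if item != primero:
--           return False
--
--   return True
--
-- def restaListas(l1: List[int], l2: List[int]) -> List[int]:
--    #a l1 le resta l2
--    res: List[int] = l1.copy()
--    if len(res) != len(l2): return []
--
--    for i in range(len(l1)):
--       res[i] = res[i] - l2[i]
--    return res
--
-- def igualDiferencia(l1: List[int], l2: List[int]) -> bool: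
--     return todosIguales(restaListas(l1,l2))
--
-- def filasParecidas(m: List[List[int]]) -> bool :
--     if len(m) == 0: return False
--     # Chequeo que la diferencia entre la primer y segunda fila sea igual. Si no lo es, ya no pueden ser filas parecidas
--     # Luego, guardo la diferencia entre la primer y segunda fila.
--     dif1 = restaListas(m[1], m[0])
--     if todosIguales(dif1):
--         n = dif1[0]
--     else:
--        return False
--
--     # Luego chequeo que esta diferencia se mantenga entre todas las filas
--     for i in reversed(range(len(m))):
--         #si i==0 ya devuelvo true porque ya chequee todas
--         if (i == 0):
--           return True
--         #si la diferencia entre dos filas no es igual, devuelvo false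
--         elif not igualDiferencia(m[i], m[i-1]):
--           return False
--         #si la diferencia entre dos filas es igual, pero es distinta a n, devuelvo false
--         elif restaListas(m[i], m[i-1])[0] != n:
--             return False
--
--     return True
-- ===== SOURCE B (Python) =====
-- from typing import List
--
-- def filasParecidas(m: List[List[int]]) -> bool:
--     if len(m) < 2:
--         return False
--     r0 = m[0]
--     if len(r0) != len(m[1]) or len(r0) == 0:
--         return False
--     n = m[1][0] - r0[0]
--     return all(len(row) == len(r0) and
--                all(x == y + i * n for x, y in zip(row, r0))
--                for i, row in enumerate(m))
-- ===== Notes on version B (the rewrite author's own statement) =====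
-- stated objective: simpler
-- what changed: B derives the expected offset n from the first two row heads and checks every row directly against the first row shifted by i*n, instead of A's pass that builds a difference list for each consecutive row pair and tests it for constancy.
import Mathlib
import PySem

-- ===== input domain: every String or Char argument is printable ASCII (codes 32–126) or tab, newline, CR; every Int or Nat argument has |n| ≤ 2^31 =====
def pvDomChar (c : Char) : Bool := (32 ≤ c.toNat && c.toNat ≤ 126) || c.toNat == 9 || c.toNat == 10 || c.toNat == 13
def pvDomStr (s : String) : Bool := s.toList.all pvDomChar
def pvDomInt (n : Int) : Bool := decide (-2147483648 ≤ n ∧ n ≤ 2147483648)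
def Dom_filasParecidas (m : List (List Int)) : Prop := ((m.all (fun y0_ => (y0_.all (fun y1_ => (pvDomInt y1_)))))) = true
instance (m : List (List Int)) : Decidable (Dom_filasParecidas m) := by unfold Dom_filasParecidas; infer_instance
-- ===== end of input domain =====

-- B checks every row against the first row shifted by i*n (one arithmetic pass),
-- instead of A's consecutive-row difference lists; objective: simpler.

-- ===== PORT A =====
def todosIguales (l : List Int) : Bool :=
  match l with
  | [] => false
  | primero :: rest => rest.all (fun item => item == primero)

def restaListas (l1 l2 : List Int) : List Int :=
  if l1.length ≠ l2.length then []
  else List.zipWith (fun a b => a - b) l1 l2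

def igualDiferencia (l1 l2 : List Int) : Bool :=
  todosIguales (restaListas l1 l2)

-- the 'for i in reversed(range(len(m)))' loop, from index k down to 0 (i = 0 returns True);
-- indices i, i-1 are in range here, so List.getD is exact for Python's m[i], m[i-1]
def filasLoopA (m : List (List Int)) (n : Int) : Nat → Bool
  | 0 => true
  | i+1 =>
    if !(igualDiferencia (m.getD (i+1) []) (m.getD i [])) then false
    -- restaListas(...)[0]: reached only when the previous check passed, so the list is
    -- nonempty and headD 0 is exact for Python's [0]
    else if (restaListas (m.getD (i+1) []) (m.getD i [])).headD 0 ≠ n then false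
    else filasLoopA m n i

def filasParecidas (m : List (List Int)) : Bool :=
  if m.length == 0 then false
  else
    match PySem.List.pyGet? m 1 with -- m[1]: IndexError on a single-row m (outside Pre_)
    | none => false
    | some r1 =>
      let dif1 := restaListas r1 (m.headD [])
      if todosIguales dif1 then
        -- n = dif1[0]; dif1 is nonempty here (todosIguales [] = false), so headD 0 is exact
        filasLoopA m (dif1.headD 0) (m.length - 1)
      else false

-- ===== PORT B =====
def altRowOk (r0 row : List Int) (k : Int) : Bool :=
  row.length == r0.length && (row.zip r0).all (fun p => p.1 == p.2 + k)

-- 'all(... for i, row in enumerate(m))' as a fold over rows with the index i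
def altAll (r0 : List Int) (n : Int) : Int → List (List Int) → Bool
  | _, [] => true
  | i, row :: rest => altRowOk r0 row (i * n) && altAll r0 n (i + 1) rest

def filasParecidas_alt (m : List (List Int)) : Bool :=
  match m with
  | r0 :: r1 :: _ =>
    if r0.length ≠ r1.length || r0.length == 0 then false
    else altAll r0 (r1.headD 0 - r0.headD 0) 0 m
  | _ => false

-- ===== PRECONDITION & SPEC =====
-- Pre_ excludes exactly the single-row matrices, on which A raises IndexError (m[1]).
def Pre_filasParecidas (m : List (List Int)) : Prop := m.length ≠ 1
instance (m : List (List Int)) : Decidable (Pre_filasParecidas m) := by unfold Pre_filasParecidas; infer_instance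
def pvWitness_filasParecidas : List (List Int) := [[1, 2], [2, 3]]

def Spec_filasParecidas (m : List (List Int)) (out : Bool) : Prop := out = filasParecidas_alt m
instance (m : List (List Int)) (out : Bool) : Decidable (Spec_filasParecidas m out) := by unfold Spec_filasParecidas; infer_instance

-- ===== CLAIM (what is proved, stated in full; the proofs are below) =====
def Claim_equal_filasParecidas : Prop := ∀ (m : List (List Int)), Dom_filasParecidas m → Pre_filasParecidas m → Spec_filasParecidas m (filasParecidas m)

-- ===== LEMMAS AND PROOFS =====

-- a pair of consecutive rows differs by the constant n
def PairP (a b : List Int) (n : Int) : Prop :=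
  a.length = b.length ∧ a ≠ [] ∧ ∀ j < a.length, a.getD j 0 - b.getD j 0 = n

-- a row equals r0 shifted by k
def RowP (r0 row : List Int) (k : Int) : Prop :=
  row.length = r0.length ∧ ∀ j < r0.length, row.getD j 0 = r0.getD j 0 + k

theorem todosIguales_iff (p : Int) (rest : List Int) :
    todosIguales (p :: rest) = true ↔ ∀ j < rest.length + 1, (p :: rest).getD j 0 = p := by
  simp only [todosIguales, List.all_eq_true, beq_iff_eq]
  constructor
  · intro h j hj
    cases j with
    | zero => rfl
    | succ j =>
      have hj' : j < rest.length := by omega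
      have hg : (p :: rest).getD (j + 1) 0 = rest[j] := by
        rw [List.getD_cons_succ, List.getD_eq_getElem rest 0 hj']
      rw [hg]; exact h _ (List.getElem_mem hj')
  · intro h x hx
    obtain ⟨i, hi, rfl⟩ := List.mem_iff_getElem.mp hx
    have hg : (p :: rest).getD (i + 1) 0 = rest[i] := by
      rw [List.getD_cons_succ, List.getD_eq_getElem rest 0 hi]
    have := h (i + 1) (by omega)
    rw [hg] at this; exact this


theorem headD_eq_getD (l : List Int) : l.headD 0 = l.getD 0 0 := by
  cases l <;> rfl

theorem todosIguales_iff' (l : List Int) :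
    todosIguales l = true ↔ l ≠ [] ∧ ∀ j < l.length, l.getD j 0 = l.headD 0 := by
  cases l with
  | nil => simp [todosIguales]
  | cons p rest =>
    rw [todosIguales_iff]
    simp only [List.length_cons, List.headD_cons, ne_eq, reduceCtorEq, not_false_eq_true, true_and]

theorem getD_zipWith_sub (a b : List Int) (hl : a.length = b.length) (j : Nat) (hj : j < a.length) :
    (List.zipWith (fun x y => x - y) a b).getD j 0 = a.getD j 0 - b.getD j 0 := by
  have hz : j < (List.zipWith (fun x y => x - y) a b).length := by
    rw [List.length_zipWith]; omega
  rw [List.getD_eq_getElem _ _ hz, List.getElem_zipWith,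
      List.getD_eq_getElem _ _ hj, List.getD_eq_getElem _ _ (by omega : j < b.length)]

theorem pairCheck_iff (a b : List Int) (n : Int) :
    (igualDiferencia a b = true ∧ (restaListas a b).headD 0 = n) ↔ PairP a b n := by
  by_cases hl : a.length = b.length
  · have hr : restaListas a b = List.zipWith (fun x y => x - y) a b := by
      simp [restaListas, hl]
    have hlen : (List.zipWith (fun x y => x - y) a b).length = a.length := by
      rw [List.length_zipWith]; omega
    rw [igualDiferencia, hr, todosIguales_iff', PairP, hlen]
    constructor
    · rintro ⟨⟨hne, hconst⟩, hhead⟩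
      have hane : a ≠ [] := by
        intro h; subst h; simp at hne
      refine ⟨hl, hane, fun j hj => ?_⟩
      rw [← getD_zipWith_sub a b hl j hj, hconst j (by omega), ← hhead]
    · rintro ⟨_, hane, hall⟩
      have h0 : 0 < a.length := List.length_pos_iff.mpr hane
      have hdne : List.zipWith (fun x y => x - y) a b ≠ [] := by
        intro h
        rw [← List.length_eq_zero_iff, hlen] at h
        omega
      have hh : (List.zipWith (fun x y => x - y) a b).headD 0 = n := by
        rw [headD_eq_getD, getD_zipWith_sub a b hl 0 h0]
        exact hall 0 h0
      refine ⟨⟨hdne, fun j hj => ?_⟩, hh⟩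
      rw [getD_zipWith_sub a b hl j (by omega), hh, hall j (by omega)]
  · have hr : restaListas a b = [] := by simp [restaListas, hl]
    rw [igualDiferencia, hr]
    simp [todosIguales, PairP, hl]

theorem altRowOk_iff (r0 row : List Int) (k : Int) :
    altRowOk r0 row k = true ↔ RowP r0 row k := by
  simp only [altRowOk, Bool.and_eq_true, beq_iff_eq, List.all_eq_true, RowP]
  constructor
  · rintro ⟨hlen, hall⟩
    refine ⟨hlen, fun j hj => ?_⟩
    have hjr : j < row.length := by omega
    have hz : j < (row.zip r0).length := by rw [List.length_zip]; omega
    have := hall _ (List.getElem_mem hz)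
    rw [List.getElem_zip] at this
    rw [List.getD_eq_getElem _ _ hjr, List.getD_eq_getElem _ _ hj]
    exact this
  · rintro ⟨hlen, hall⟩
    refine ⟨hlen, fun p hp => ?_⟩
    obtain ⟨j, hj, hpj⟩ := List.mem_iff_getElem.mp hp
    rw [List.getElem_zip] at hpj
    have hjr : j < row.length := by rw [List.length_zip] at hj; omega
    have hj0 : j < r0.length := by rw [List.length_zip] at hj; omega
    have := hall j hj0
    rw [List.getD_eq_getElem _ _ hjr, List.getD_eq_getElem _ _ hj0] at this
    rw [← hpj]; exact this

theorem filasLoopA_iff (m : List (List Int)) (n : Int) (k : Nat) :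
    filasLoopA m n k = true ↔ ∀ i, 1 ≤ i → i ≤ k → PairP (m.getD i []) (m.getD (i - 1) []) n := by
  induction k with
  | zero => simp only [filasLoopA, true_iff]; intro i h1 h2; omega
  | succ k ih =>
    have hstep : filasLoopA m n (k + 1) = true ↔
        PairP (m.getD (k + 1) []) (m.getD k []) n ∧ filasLoopA m n k = true := by
      rw [← pairCheck_iff _ _ n, filasLoopA]
      split_ifs with c1 c2
      · refine iff_of_false (by simp) ?_
        rintro ⟨⟨h1, _⟩, _⟩
        rw [h1] at c1; exact absurd c1 (by simp)
      · refine iff_of_false (by simp) ?_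
        rintro ⟨⟨_, h2⟩, _⟩
        exact c2 h2
      · have c1' : igualDiferencia (m.getD (k + 1) []) (m.getD k []) = true := by
          simpa using c1
        constructor
        · intro h; exact ⟨⟨c1', not_not.mp c2⟩, h⟩
        · rintro ⟨_, h⟩; exact h
    rw [hstep, ih]
    constructor
    · rintro ⟨hp, hrest⟩ i h1 h2
      rcases Nat.lt_or_ge i (k + 1) with hik | hik
      · exact hrest i h1 (by omega)
      · have hi : i = k + 1 := by omega
        subst hi
        simpa using hp
    · intro h
      exact ⟨by simpa using h (k + 1) (by omega) (le_refl _),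
        fun i h1 h2 => h i h1 (by omega)⟩

theorem altAll_iff (r0 : List Int) (n : Int) (i : Int) (rows : List (List Int)) :
    altAll r0 n i rows = true ↔ ∀ j < rows.length, RowP r0 (rows.getD j []) ((i + j) * n) := by
  induction rows generalizing i with
  | nil => simp [altAll]
  | cons row rest ih =>
    rw [altAll, Bool.and_eq_true, altRowOk_iff, ih (i + 1)]
    constructor
    · rintro ⟨h0, hrest⟩ j hj
      cases j with
      | zero => simpa using h0
      | succ j =>
        have hj' : j < rest.length := by rw [List.length_cons] at hj; omega
        have := hrest j hj'
        simp only [List.getD_cons_succ]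
        convert this using 2
        push_cast; ring
    · intro h
      constructor
      · simpa using h 0 (by rw [List.length_cons]; omega)
      · intro j hj
        have := h (j + 1) (by rw [List.length_cons]; omega)
        simp only [List.getD_cons_succ] at this
        convert this using 2
        push_cast; ring

-- bridge: consecutive constant differences ⇔ arithmetic offset from the first row
theorem bridge (r0 r1 : List Int) (rest : List (List Int)) (n : Int)
    (hlen : r0.length = r1.length) (hne : r0 ≠ []) :
    (∀ i, 1 ≤ i → i ≤ (r0 :: r1 :: rest).length - 1 →
        PairP ((r0 :: r1 :: rest).getD i []) ((r0 :: r1 :: rest).getD (i - 1) []) n) ↔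
    (∀ j < (r0 :: r1 :: rest).length, RowP r0 ((r0 :: r1 :: rest).getD j []) ((0 + (j : Int)) * n)) := by
  constructor
  · intro h j
    induction j with
    | zero =>
      intro _
      exact ⟨rfl, fun j' _ => by simp⟩
    | succ j ihj =>
      intro hj
      have hL : (r0 :: r1 :: rest).length = rest.length + 2 := by
        simp
      have hjL : j < (r0 :: r1 :: rest).length := by omega
      have hpair := h (j + 1) (by omega) (by omega)
      simp only [Nat.add_sub_cancel] at hpair
      obtain ⟨hlen', hne', hdiff⟩ := hpair
      obtain ⟨ihlen, ihval⟩ := ihj hjL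
      refine ⟨hlen'.trans ihlen, fun j' hj' => ?_⟩
      have hd := hdiff j' (by rw [hlen'.trans ihlen]; exact hj')
      have hv := ihval j' hj'
      push_cast
      linear_combination hd + hv
  · intro h i h1 hi
    simp only [List.length_cons] at hi
    have hR1 := h i (by simp only [List.length_cons]; omega)
    have hR0 := h (i - 1) (by simp only [List.length_cons]; omega)
    obtain ⟨l1, v1⟩ := hR1
    obtain ⟨l0, v0⟩ := hR0
    have h0 : 0 < r0.length := List.length_pos_iff.mpr hne
    refine ⟨l1.trans l0.symm, ?_, fun j hj => ?_⟩
    · intro hnil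
      rw [hnil] at l1
      simp at l1
      omega
    · have hj' : j < r0.length := by rw [l1] at hj; exact hj
      rw [v1 j hj', v0 j hj']
      push_cast [Nat.cast_sub h1]
      ring

-- B on a two-or-more-row matrix with the guards passed
theorem B_char (r0 r1 : List Int) (rest : List (List Int))
    (hl : r0.length = r1.length) (hne : r0 ≠ []) :
    filasParecidas_alt (r0 :: r1 :: rest) = true ↔
      ∀ j < (r0 :: r1 :: rest).length,
        RowP r0 ((r0 :: r1 :: rest).getD j []) ((0 + (j : Int)) * (r1.headD 0 - r0.headD 0)) := by
  have h0 : r0.length ≠ 0 := fun h => hne (List.length_eq_zero_iff.mp h)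
  rw [filasParecidas_alt, if_neg (by
    simp only [Bool.or_eq_true, decide_eq_true_eq, beq_iff_eq]
    rintro (h | h)
    · exact h hl
    · exact h0 h), altAll_iff]

-- ===== VERDICT (by name: the statement is the Claim_ definition above) =====
theorem filasParecidas_spec : Claim_equal_filasParecidas := by
  intro m _ hpre
  unfold Spec_filasParecidas
  cases m with
  | nil => rfl
  | cons r0 m' =>
    cases m' with
    | nil =>
      unfold Pre_filasParecidas at hpre
      simp at hpre
    | cons r1 rest =>
      by_cases hl : r1.length = r0.length
      · by_cases hne : r0 = []
        · -- r0 empty: dif1 = [] so A is False; B's guard len(m[0]) == 0 fires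
          have hA : filasParecidas (r0 :: r1 :: rest) = false := by
            subst hne
            have hr1 : r1 = [] := List.length_eq_zero_iff.mp (by simpa using hl)
            subst hr1
            simp [filasParecidas, restaListas, todosIguales]
          have hB : filasParecidas_alt (r0 :: r1 :: rest) = false := by
            subst hne
            simp [filasParecidas_alt]
          rw [hA, hB]
        · -- main case: both rows nonempty, equal lengths
          have h0 : 0 < r0.length := List.length_pos_iff.mpr hne
          have h01 : 0 < r1.length := by omega
          have hn : (restaListas r1 r0).headD 0 = r1.headD 0 - r0.headD 0 := by
            rw [restaListas, if_neg (by simp [hl]), headD_eq_getD,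
              getD_zipWith_sub r1 r0 hl 0 h01, headD_eq_getD, headD_eq_getD]
          have hAiff : filasParecidas (r0 :: r1 :: rest) = true ↔
              todosIguales (restaListas r1 r0) = true ∧
                filasLoopA (r0 :: r1 :: rest) ((restaListas r1 r0).headD 0)
                  (rest.length + 1) = true := by
            by_cases hti : todosIguales (restaListas r1 r0) = true
            · simp [filasParecidas, hti]
            · simp [filasParecidas, hti]
          have hPair : todosIguales (restaListas r1 r0) = true ↔
              PairP r1 r0 (r1.headD 0 - r0.headD 0) := by
            rw [← pairCheck_iff r1 r0 (r1.headD 0 - r0.headD 0), igualDiferencia]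
            constructor
            · intro h; exact ⟨h, hn⟩
            · rintro ⟨h, _⟩; exact h
          rw [Bool.eq_iff_iff, hAiff, hn, hPair, filasLoopA_iff,
            B_char r0 r1 rest hl.symm hne, ← bridge r0 r1 rest _ hl.symm hne]
          constructor
          · rintro ⟨_, h⟩ i h1 hi
            exact h i h1 (by simpa using hi)
          · intro h
            refine ⟨?_, fun i h1 hi => h i h1 (by simpa using hi)⟩
            have := h 1 (by omega) (by simp)
            simpa using this
      · -- differing row lengths: dif1 = [] so A is False; B's length guard fires
        have hA : filasParecidas (r0 :: r1 :: rest) = false := by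
          simp [filasParecidas, restaListas, hl, todosIguales]
        have hB : filasParecidas_alt (r0 :: r1 :: rest) = false := by
          have : r0.length ≠ r1.length := fun h => hl h.symm
          simp [filasParecidas_alt, this]
        rw [hA, hB]
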